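-- pv_equiv track=rewrite | github.com/versa-networks/devops | python/Fortinet-to-Versa-Conversion/scripts/step-6.py | extract_object_names_from_file
-- ===== SOURCE A (Python) =====
-- def parse_object_token_after_prefix(line: str, prefix: str):
--     lstripped = line.lstrip()
--     lead = len(line) - len(lstripped)
--     if not lstripped.startswith(prefix):
--         return (None, None, None)
--
--     start = lead + len(prefix)
--     while start < len(line) and line[start].isspace():
--         start += 1
--     if start >= len(line):
--         return (None, None, None)
--
--     if line[start] == '"':
--         endq = line.find('"', start + 1)
--         if endq == -1:
--             end = start
--             while end < len(line) and not line[end].isspace():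
--                 end += 1
--             return (line[start:end], start, end)
--         else:
--             return (line[start:endq + 1], start, endq + 1)
--     else:
--         end = start
--         while end < len(line) and not line[end].isspace():
--             end += 1
--         return (line[start:end], start, end)
--
-- def build_unique_preserve_order(items):
--     seen = set()
--     out = []
--     for x in items:
--         if x not in seen:
--             seen.add(x)
--             out.append(x)
--     return out
--
-- def extract_object_names_from_file(lines, prefix: str):
--     names = []
--     for line in lines:
--         token, _, _ = parse_object_token_after_prefix(line, prefix)
--         if token is None:
--             continue
--         name = token
--         if len(name) >= 2 and name[0] == '"' and name[-1] == '"':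
--             name = name[1:-1].replace(" ", "_")
--         names.append(name)
--     return build_unique_preserve_order(names)
-- ===== SOURCE B (Python) =====
-- def extract_object_names_from_file(lines, prefix: str):
--     names = {}
--     for line in lines:
--         rest = line.lstrip()
--         if not rest.startswith(prefix):
--             continue
--         rest = rest[len(prefix):].lstrip()
--         if not rest:
--             continue
--         if rest[0] == '"':
--             q = rest.find('"', 1)
--             if q != -1:
--                 name = rest[1:q].replace(" ", "_")
--             else:
--                 name = rest.split(None, 1)[0]
--         else:
--             name = rest.split(None, 1)[0]
--         names[name] = None
--     return list(names)
-- ===== Notes on version B (the rewrite author's own statement) =====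
-- stated objective: idiomatic
-- what changed: B replaces A's manual index-based character scanning (lstrip bookkeeping via a lead offset, while-loops advancing integer cursors over the original line, slicing by absolute indices, plus a separate post-processing step that re-inspects the token's first/last characters) with direct string-level operations on the stripped remainder (startswith, slicing off the prefix, lstrip, find on the remainder, split(None,1)), deciding quoted vs unquoted from the remainder's first character, and replaces A's set+list dedup pass with an insertion-ordered dict dedup built during the loop.
import Mathlib
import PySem

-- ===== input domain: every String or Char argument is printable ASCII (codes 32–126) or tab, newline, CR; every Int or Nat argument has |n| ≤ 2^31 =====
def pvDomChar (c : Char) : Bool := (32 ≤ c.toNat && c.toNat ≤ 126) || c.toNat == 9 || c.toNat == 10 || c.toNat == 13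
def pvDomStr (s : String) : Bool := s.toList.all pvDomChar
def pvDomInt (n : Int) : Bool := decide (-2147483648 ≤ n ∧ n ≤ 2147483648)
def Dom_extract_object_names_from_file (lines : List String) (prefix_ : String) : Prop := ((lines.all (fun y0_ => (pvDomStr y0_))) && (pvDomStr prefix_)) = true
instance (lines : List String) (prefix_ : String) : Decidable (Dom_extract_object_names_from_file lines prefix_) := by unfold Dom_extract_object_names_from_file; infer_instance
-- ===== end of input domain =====

-- B replaces A's index-cursor character scanning with string-level slicing/find/split on the
-- stripped remainder, and A's set+list dedup with an insertion-ordered dict dedup (same asymptotics).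

-- ===== PORT A =====
-- while start < len(line) and line[start].isspace(): start += 1
def pvSkipSpace (cs : List Char) (i : Nat) : Nat :=
  if h : i < cs.length then
    if PySem.Chars.isspace cs[i] then pvSkipSpace cs (i + 1) else i
  else i
termination_by cs.length - i

-- while end < len(line) and not line[end].isspace(): end += 1
def pvScanEnd (cs : List Char) (i : Nat) : Nat :=
  if h : i < cs.length then
    if ¬ PySem.Chars.isspace cs[i] then pvScanEnd cs (i + 1) else i
  else i
termination_by cs.length - i

-- parse_object_token_after_prefix (positions returned as in Python; the caller discards them)
def pvParseTok (cs p : List Char) : Option (List Char) × Option Int × Option Int :=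
  let lstripped := PySem.Chars.lstrip cs
  let lead := cs.length - lstripped.length
  if ¬ PySem.Chars.startswith lstripped p then (none, none, none)
  else
    let start := pvSkipSpace cs (lead + p.length)
    if start ≥ cs.length then (none, none, none)
    -- start < cs.length in this branch, so the getD default is never read (Python's cs[start])
    else if cs.getD start ' ' = '"' then
      let endq := PySem.Chars.findFrom cs ['"'] ((start : Int) + 1)
      if endq = -1 then
        let e := pvScanEnd cs start
        (some (PySem.List.slice cs (some (start : Int)) (some (e : Int))), some (start : Int), some (e : Int))
      else
        (some (PySem.List.slice cs (some (start : Int)) (some (endq + 1))), some (start : Int), some (endq + 1))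
    else
      let e := pvScanEnd cs start
      (some (PySem.List.slice cs (some (start : Int)) (some (e : Int))), some (start : Int), some (e : Int))

-- if len(name) >= 2 and name[0] == '"' and name[-1] == '"': name = name[1:-1].replace(" ", "_")
def pvPost (token : List Char) : List Char :=
  if 2 ≤ token.length ∧ PySem.List.pyGet? token 0 = some '"' ∧ PySem.List.pyGet? token (-1) = some '"' then
    PySem.Chars.replace (PySem.List.slice token (some 1) (some (-1))) [' '] ['_']
  else token

-- build_unique_preserve_order: seen is a Python set, out the result list
def pvUniq (xs : List (List Char)) : List (List Char) :=
  (xs.foldl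
    (fun (p : PySem.Set (List Char) × List (List Char)) x =>
      if p.1.contains x then p else (PySem.Set.add p.1 x, p.2 ++ [x]))
    (PySem.Set.empty, [])).2

def extract_object_names_from_file (lines : List String) (prefix_ : String) : List String :=
  let names := lines.foldl
    (fun names line =>
      match (pvParseTok line.toList prefix_.toList).1 with
      | none => names
      | some token => names ++ [pvPost token])
    []
  (pvUniq names).map String.ofList

-- ===== PORT B =====
def pvNameAfter (line pref : List Char) : Option (List Char) :=
  let rest := PySem.Chars.lstrip line
  if PySem.Chars.startswith rest pref then
    let rest2 := PySem.Chars.lstrip (PySem.List.slice rest (some (pref.length : Int)) none)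
    match rest2 with
    | [] => none
    | c :: _ =>
      if c = '"' then
        let q := PySem.Chars.findFrom rest2 ['"'] 1
        if q ≠ -1 then
          some (PySem.Chars.replace (PySem.List.slice rest2 (some 1) (some q)) [' '] ['_'])
        else
          -- rest.split(None, 1)[0]: rest2 ≠ [] so index 0 exists, headD's default is never used
          some ((PySem.Chars.split₀Max rest2 1).headD [])
      else
        some ((PySem.Chars.split₀Max rest2 1).headD [])
  else none

def extract_object_names_from_file_alt (lines : List String) (prefix_ : String) : List String :=
  (PySem.List.dedup (lines.filterMap (fun l => pvNameAfter l.toList prefix_.toList))).map String.ofList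

-- ===== PRECONDITION & SPEC =====
def Spec_extract_object_names_from_file (lines : List String) (prefix_ : String) (out : List String) : Prop := out = extract_object_names_from_file_alt lines prefix_
instance (lines : List String) (prefix_ : String) (out : List String) : Decidable (Spec_extract_object_names_from_file lines prefix_ out) := by unfold Spec_extract_object_names_from_file; infer_instance

-- ===== CLAIM (what is proved, stated in full; the proofs are below) =====
def Claim_equal_extract_object_names_from_file : Prop := ∀ (lines : List String) (prefix_ : String), Dom_extract_object_names_from_file lines prefix_ → Spec_extract_object_names_from_file lines prefix_ (extract_object_names_from_file lines prefix_)

-- ===== LEMMAS AND PROOFS =====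

lemma pvSkipSpace_eq (cs : List Char) (i : Nat) :
    pvSkipSpace cs i = i + (List.takeWhile PySem.Chars.isspace (cs.drop i)).length := by
  fun_induction pvSkipSpace cs i with
  | case1 i h hsp ih =>
      rw [ih, List.drop_eq_getElem_cons h, List.takeWhile_cons, hsp]
      simp; omega
  | case2 i h hsp =>
      rw [List.drop_eq_getElem_cons h, List.takeWhile_cons]
      simp [hsp]
  | case3 i h =>
      rw [List.drop_eq_nil_of_le (by omega)]
      simp

lemma pvScanEnd_eq (cs : List Char) (i : Nat) :
    pvScanEnd cs i = i + (List.takeWhile (fun c => !PySem.Chars.isspace c) (cs.drop i)).length := by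
  fun_induction pvScanEnd cs i with
  | case1 i h hsp ih =>
      rw [ih, List.drop_eq_getElem_cons h, List.takeWhile_cons]
      simp [hsp]; omega
  | case2 i h hsp =>
      rw [List.drop_eq_getElem_cons h, List.takeWhile_cons]
      simp at hsp
      simp [hsp]
  | case3 i h =>
      rw [List.drop_eq_nil_of_le (by omega)]
      simp

lemma pvUniq_aux (xs : List (List Char)) : ∀ (s : PySem.Set (List Char)),
    xs.foldl (fun p x => if p.1.contains x then p else (PySem.Set.add p.1 x, p.2 ++ [x])) (s, s)
      = (xs.foldl PySem.Set.add s, xs.foldl PySem.Set.add s) := by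
  induction xs with
  | nil => intro s; simp
  | cons x xs ih =>
      intro s
      have hstep : (if (s : List (List Char)).contains x then ((s : PySem.Set (List Char)), (s : List (List Char))) else (PySem.Set.add s x, s ++ [x]))
          = (PySem.Set.add s x, PySem.Set.add s x) := by
        unfold PySem.Set.add
        by_cases hc : x ∈ (s : List (List Char)) <;> simp [hc]
      rw [List.foldl_cons]
      show List.foldl _ (if (s : List (List Char)).contains x then ((s : PySem.Set (List Char)), (s : List (List Char))) else (PySem.Set.add s x, s ++ [x])) xs = _
      rw [hstep]
      exact ih (PySem.Set.add s x)

lemma pvUniq_eq (xs : List (List Char)) : pvUniq xs = PySem.List.dedup xs := by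
  unfold pvUniq
  have h0 : ((PySem.Set.empty : PySem.Set (List Char)), ([] : List (List Char)))
      = ((PySem.Set.empty : PySem.Set (List Char)), (PySem.Set.empty : PySem.Set (List Char))) := rfl
  rw [h0, pvUniq_aux]
  rfl

lemma pvFoldA (p : List Char) (lines : List String) (acc : List (List Char)) :
    lines.foldl
      (fun ns l => match (pvParseTok l.toList p).1 with
        | none => ns
        | some token => ns ++ [pvPost token]) acc
      = acc ++ lines.filterMap (fun l => Option.map pvPost (pvParseTok l.toList p).1) := by
  induction lines generalizing acc with
  | nil => simp
  | cons l ls ih =>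
      cases hp : (pvParseTok l.toList p).1 <;> simp [hp, ih]

lemma pvSplit_head (c : Char) (t : List Char) (h : PySem.Chars.isspace c = false) :
    (PySem.Chars.split₀Max (c :: t) 1).headD [] = List.takeWhile (fun x => !PySem.Chars.isspace x) (c :: t) := by
  have hd : List.dropWhile PySem.Chars.isspace (c :: t) = c :: t := by simp [h]
  rw [PySem.Chars.split₀Max]
  norm_num
  rw [PySem.Chars.split₀Max.go.eq_def]
  simp only [hd]
  norm_num
  rw [PySem.Chars.split₀Max.go.eq_def]
  cases hdd : List.dropWhile PySem.Chars.isspace (List.dropWhile (fun c => !PySem.Chars.isspace c) (c :: t)) with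
  | nil =>
      simp only [hdd]
      simp
  | cons a b =>
      simp only [hdd]
      simp

lemma pvDropWhile_eq_drop (q : Char → Bool) (l : List Char) :
    List.dropWhile q l = l.drop (List.takeWhile q l).length := by
  induction l with
  | nil => simp
  | cons a t ih => by_cases hq : q a <;> simp [hq, ih]

lemma pvHead_dropWhile (q : Char → Bool) {l : List Char} {d : Char} {r : List Char}
    (h : List.dropWhile q l = d :: r) : q d = false := by
  have := List.head_dropWhile_not q (l := l) (by simp [h])
  simpa [h] using this

lemma pvGet_neg_one (l : List Char) : PySem.List.pyGet? l (-1) = l.getLast? := by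
  cases h : l with
  | nil => simp [PySem.List.pyGet?, PySem.List.pyIdx?]
  | cons a t =>
      rw [List.getLast?_eq_getElem?]
      simp [PySem.List.pyGet?, PySem.List.pyIdx?]

lemma pvLast_cons (a : Char) (t : List Char) (h : t ≠ []) : (a :: t).getLast? = t.getLast? := by
  cases t with
  | nil => simp at h
  | cons b u => simp [List.getLast?_cons_cons]

lemma pvParse_post_eq (cs p : List Char) :
    Option.map pvPost (pvParseTok cs p).1 = pvNameAfter cs p := by
  unfold pvParseTok pvNameAfter
  by_cases hs : PySem.Chars.startswith (PySem.Chars.lstrip cs) p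
  · simp only [hs, not_true_eq_false, if_false, if_true]
    have hr2 : PySem.Chars.lstrip (PySem.List.slice (PySem.Chars.lstrip cs) (some (p.length : Int)))
        = List.dropWhile PySem.Chars.isspace ((PySem.Chars.lstrip cs).drop p.length) := by
      rw [PySem.List.slice_from _ (by positivity)]
      simp [PySem.Chars.lstrip]
    rw [hr2]
    -- abbreviations
    set ls := PySem.Chars.lstrip cs with hls
    set r := ls.drop p.length with hrdef
    set r2 := List.dropWhile PySem.Chars.isspace r with hr2def
    -- the A-side cursor
    have htwle : (List.takeWhile PySem.Chars.isspace cs).length ≤ cs.length :=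
      (List.takeWhile_sublist _).length_le
    have hlslen : ls.length = cs.length - (List.takeWhile PySem.Chars.isspace cs).length := by
      rw [hls, PySem.Chars.lstrip, pvDropWhile_eq_drop, List.length_drop]
    have hlead : cs.length - ls.length = (List.takeWhile PySem.Chars.isspace cs).length := by omega
    have hcs_lead : cs.drop (cs.length - ls.length) = ls := by
      rw [hlead, hls, PySem.Chars.lstrip, pvDropWhile_eq_drop]
    have hdropr : cs.drop (cs.length - ls.length + p.length) = r := by
      rw [← List.drop_drop, hcs_lead, hrdef]
    have hskip : pvSkipSpace cs (cs.length - ls.length + p.length)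
        = cs.length - ls.length + p.length + (List.takeWhile PySem.Chars.isspace r).length := by
      rw [pvSkipSpace_eq, hdropr]
    set start := pvSkipSpace cs (cs.length - ls.length + p.length) with hstart
    have hdrop_start : cs.drop start = r2 := by
      rw [hskip, ← List.drop_drop, hdropr, hr2def, pvDropWhile_eq_drop]
    cases hr2c : r2 with
    | nil =>
        have hge : start ≥ cs.length := by
          have := hdrop_start
          rw [hr2c] at this
          exact List.drop_eq_nil_iff.mp this
        rw [if_pos hge]
        simp
    | cons d r2t =>
        rw [hr2c] at hdrop_start
        have hlt : start < cs.length := by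
          by_contra hge
          rw [List.drop_eq_nil_of_le (by omega)] at hdrop_start
          exact (List.cons_ne_nil _ _) hdrop_start.symm
        have hcons : cs[start] :: cs.drop (start + 1) = d :: r2t := by
          rw [← List.drop_eq_getElem_cons hlt, hdrop_start]
        have h1 : cs[start] = d := (List.cons_eq_cons.mp hcons).1
        have htail : cs.drop (start + 1) = r2t := (List.cons_eq_cons.mp hcons).2
        have hget : cs.getD start ' ' = d := by
          rw [List.getD_eq_getElem?_getD, List.getElem?_eq_getElem hlt, h1]
          rfl
        have hdns : PySem.Chars.isspace d = false := pvHead_dropWhile _ (hr2def ▸ hr2c)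
        have hscan : PySem.List.slice cs (some (start : Int)) (some ((pvScanEnd cs start : Nat) : Int))
            = List.takeWhile (fun c => !PySem.Chars.isspace c) (d :: r2t) := by
          rw [pvScanEnd_eq, hdrop_start, PySem.List.slice_natCast]
          have he : start + (List.takeWhile (fun c => !PySem.Chars.isspace c) (d :: r2t)).length - start
              = (List.takeWhile (fun c => !PySem.Chars.isspace c) (d :: r2t)).length := by omega
          rw [he, hdrop_start]
          exact (List.prefix_iff_eq_take.mp (List.takeWhile_prefix _)).symm
        have htk : List.takeWhile (fun c => !PySem.Chars.isspace c) (d :: r2t)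
            = d :: List.takeWhile (fun c => !PySem.Chars.isspace c) r2t := by
          rw [List.takeWhile_cons, hdns]
          simp
        rw [if_neg (by omega : ¬ start ≥ cs.length)]
        simp only [hget]
        by_cases hdq : d = '"'
        · -- quoted head
          subst hdq
          rw [if_pos rfl, if_pos rfl]
          have hffA : PySem.Chars.findFrom cs ['"'] ((start : Int) + 1)
              = if PySem.Chars.find r2t ['"'] = -1 then -1
                else ((start + 1 : Nat) : Int) + PySem.Chars.find r2t ['"'] := by
            have hc : ((start : Int) + 1) = ((start + 1 : Nat) : Int) := by push_cast; ring
            rw [hc, PySem.Chars.findFrom_natCast cs ['"'] (start + 1) (by omega), htail]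
          have hffB : PySem.Chars.findFrom ('"' :: r2t) ['"'] 1
              = if PySem.Chars.find r2t ['"'] = -1 then -1
                else 1 + PySem.Chars.find r2t ['"'] := by
            have hone : (1 : Int) = ((1 : Nat) : Int) := by norm_num
            rw [hone, PySem.Chars.findFrom_natCast ('"' :: r2t) ['"'] 1 (by simp)]
            simp
          by_cases hf : PySem.Chars.find r2t ['"'] = -1
          · -- unterminated quote: scan to whitespace, post-processing is the identity
            rw [hffA, if_pos hf, if_pos rfl, hffB, if_pos hf]
            simp only [ne_eq, not_true_eq_false, if_false, Option.map_some]
            have hq_notin : '"' ∉ r2t := by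
              intro hm
              exact (PySem.Chars.find_eq_neg_one_iff r2t ['"']).mp hf ((List.singleton_infix_iff _ _).mpr hm)
            have hpost : pvPost (List.takeWhile (fun c => !PySem.Chars.isspace c) ('"' :: r2t))
                = List.takeWhile (fun c => !PySem.Chars.isspace c) ('"' :: r2t) := by
              rw [htk]
              unfold pvPost
              cases htkc : List.takeWhile (fun c => !PySem.Chars.isspace c) r2t with
              | nil => simp
              | cons x u =>
                  rw [if_neg]
                  rintro ⟨-, -, hlast⟩
                  rw [pvGet_neg_one, pvLast_cons _ _ (by simp)] at hlast
                  have hne : (x :: u) ≠ [] := by simp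
                  rw [List.getLast?_eq_some_getLast hne] at hlast
                  have hmem2 : '"' ∈ (x :: u) := by
                    have hm := List.getLast_mem hne
                    rwa [Option.some_inj.mp hlast] at hm
                  have hmem3 : '"' ∈ List.takeWhile (fun c => !PySem.Chars.isspace c) r2t :=
                    htkc.symm ▸ hmem2
                  exact hq_notin ((List.takeWhile_sublist _).subset hmem3)
            rw [hscan, hpost, pvSplit_head '"' r2t hdns]
          · -- closing quote found: strip the quotes, replace spaces
            rw [hffA, if_neg hf, hffB, if_neg hf]
            have hj0 : 0 ≤ PySem.Chars.find r2t ['"'] := by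
              have := PySem.Chars.neg_one_le_find r2t ['"']
              omega
            set j := PySem.Chars.find r2t ['"'] with hj
            have hjcast : j = ((j.toNat : Nat) : Int) := (Int.toNat_of_nonneg hj0).symm
            set jn := j.toNat with hjn
            have hpre : ['"'] <+: r2t.drop jn := by
              have := (PySem.Chars.find_spec (s := r2t) (sub := ['"']) hj0).1
              rwa [← hj, ← hjn] at this
            have hjlt : jn < r2t.length := by
              rcases hpre with ⟨w, hw⟩
              have hne : r2t.drop jn ≠ [] := by rw [← hw]; simp
              have := List.drop_eq_nil_iff.not.mp hne
              omega
            have hjget : r2t[jn] = '"' := by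
              rcases hpre with ⟨w, hw⟩
              rw [List.drop_eq_getElem_cons hjlt] at hw
              exact (List.cons_eq_cons.mp hw.symm).1
            rw [if_neg (by rw [hjcast]; omega : ¬ (((start + 1 : Nat) : Int) + j = -1)),
                if_pos (by rw [hjcast]; omega : ((1 : Int) + j ≠ -1))]
            simp only [Option.map_some, Option.some_inj]
            -- A's token:  cs[start : endq+1] = '"' :: r2t.take (jn+1)
            have htokA : PySem.List.slice cs (some (start : Int)) (some (((start + 1 : Nat) : Int) + j + 1))
                = '"' :: r2t.take (jn + 1) := by
              have hc : (((start + 1 : Nat) : Int) + j + 1) = ((start + jn + 2 : Nat) : Int) := by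
                rw [hjcast]; push_cast; ring
              rw [hc, PySem.List.slice_natCast]
              have he : start + jn + 2 - start = jn + 2 := by omega
              rw [he, hdrop_start]
              have h2 : jn + 2 = (jn + 1) + 1 := rfl
              rw [h2, List.take_succ_cons]
            rw [htokA]
            -- post-processing strips the quotes
            have hlen : ('"' :: r2t.take (jn + 1)).length = jn + 2 := by
              simp [List.length_take]
              omega
            have htne : r2t.take (jn + 1) ≠ [] := by
              rw [Ne, List.take_eq_nil_iff]
              push Not
              exact ⟨by omega, List.ne_nil_of_length_pos (by omega)⟩
            have hlast : PySem.List.pyGet? ('"' :: r2t.take (jn + 1)) (-1) = some '"' := by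
              rw [pvGet_neg_one, pvLast_cons _ _ htne, List.getLast?_eq_getElem?, List.length_take]
              have hmin : min (jn + 1) r2t.length - 1 = jn := by omega
              rw [hmin, List.getElem?_take, if_pos (by omega), List.getElem?_eq_getElem hjlt, hjget]
            unfold pvPost
            rw [if_pos ⟨by rw [hlen]; omega, by rw [show (0:Int) = ((0:Nat):Int) from rfl, PySem.List.pyGet?_natCast]; rfl, hlast⟩]
            -- both sides slice out r2t.take jn
            have hsliceA : PySem.List.slice ('"' :: r2t.take (jn + 1)) (some 1) (some (-1))
                = r2t.take jn := by
              unfold PySem.List.slice PySem.List.clampIdx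
              rw [hlen]
              norm_num
              rw [if_neg (by omega : ¬ ((jn : Int) + 2 < 1))]
              have hn : ((jn : Int) + 2 + -1).toNat = jn + 1 := by omega
              rw [hn, show jn + 1 - 1 = jn from rfl, List.take_take, Nat.min_eq_left (by omega)]
            have hsliceB : PySem.List.slice ('"' :: r2t) (some 1) (some (1 + j))
                = r2t.take jn := by
              have hc : (1 + j : Int) = ((1 + jn : Nat) : Int) := by rw [hjcast]; push_cast; ring
              have hone : (1 : Int) = ((1 : Nat) : Int) := by norm_num
              rw [hc, hone, PySem.List.slice_natCast]
              simp
            rw [hsliceA, hsliceB]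
        · -- unquoted token
          rw [if_neg (by simpa using hdq), if_neg hdq]
          simp only [Option.map_some, Option.some_inj]
          have hpost : pvPost (List.takeWhile (fun c => !PySem.Chars.isspace c) (d :: r2t))
              = List.takeWhile (fun c => !PySem.Chars.isspace c) (d :: r2t) := by
            rw [htk]
            unfold pvPost
            rw [if_neg]
            rintro ⟨-, hfirst, -⟩
            simp [PySem.List.pyGet?, PySem.List.pyIdx?] at hfirst
            exact hdq hfirst
          rw [hscan, hpost, pvSplit_head d r2t hdns]
  · simp only [hs, Bool.false_eq_true, not_false_eq_true, if_true, if_false]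
    simp

-- ===== VERDICT (by name: the statement is the Claim_ definition above) =====
theorem extract_object_names_from_file_spec : Claim_equal_extract_object_names_from_file := by
  intro lines prefix_ _
  show _ = _
  show (pvUniq (lines.foldl
      (fun ns l => match (pvParseTok l.toList prefix_.toList).1 with
        | none => ns
        | some token => ns ++ [pvPost token]) [])).map String.ofList
    = (PySem.List.dedup (lines.filterMap (fun l => pvNameAfter l.toList prefix_.toList))).map String.ofList
  rw [pvFoldA, pvUniq_eq]
  simp only [List.nil_append]
  congr 2
  exact List.filterMap_congr (fun l _ => pvParse_post_eq l.toList prefix_.toList)
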